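-- pv_equiv track=rewrite | github.com/jacklxc/CORWA | pipeline/util.py | citation_by_sentence
-- ===== SOURCE A (Python) =====
-- def citation_by_sentence(tokens, citation_BIO_labels):
--     dominant_count = 0
--     reference_count = 0
--     counts = []
--     for i in range(len(tokens)):
--         if citation_BIO_labels[i] == "B_Dominant":
--             dominant_count += 1
--         elif citation_BIO_labels[i] == "B_Reference":
--             reference_count += 1
--         if tokens[i] == "[BOS]":
--             if i > 0:
--                 counts.append((dominant_count, reference_count))
--             dominant_count = 0
--             reference_count = 0
--     counts.append((dominant_count, reference_count))
--     return counts
-- ===== SOURCE B (Python) =====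
-- def citation_by_sentence(tokens, citation_BIO_labels):
--     def cnt(seg):
--         return (seg.count("B_Dominant"), seg.count("B_Reference"))
--     bos = [i for i, t in enumerate(tokens) if t == "[BOS]"]
--     counts = []
--     prev = -1
--     for b in bos:
--         if b > 0:
--             counts.append(cnt(citation_BIO_labels[prev + 1:b + 1]))
--         prev = b
--     counts.append(cnt(citation_BIO_labels[prev + 1:len(tokens)]))
--     return counts
-- ===== Notes on version B (the rewrite author's own statement) =====
-- stated objective: alternative
-- what changed: Replaces A's single accumulating scan (running counters reset at each [BOS]) by first collecting the [BOS] boundary indices and then counting B_Dominant/B_Reference over each label slice between consecutive boundaries.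
import Mathlib
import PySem

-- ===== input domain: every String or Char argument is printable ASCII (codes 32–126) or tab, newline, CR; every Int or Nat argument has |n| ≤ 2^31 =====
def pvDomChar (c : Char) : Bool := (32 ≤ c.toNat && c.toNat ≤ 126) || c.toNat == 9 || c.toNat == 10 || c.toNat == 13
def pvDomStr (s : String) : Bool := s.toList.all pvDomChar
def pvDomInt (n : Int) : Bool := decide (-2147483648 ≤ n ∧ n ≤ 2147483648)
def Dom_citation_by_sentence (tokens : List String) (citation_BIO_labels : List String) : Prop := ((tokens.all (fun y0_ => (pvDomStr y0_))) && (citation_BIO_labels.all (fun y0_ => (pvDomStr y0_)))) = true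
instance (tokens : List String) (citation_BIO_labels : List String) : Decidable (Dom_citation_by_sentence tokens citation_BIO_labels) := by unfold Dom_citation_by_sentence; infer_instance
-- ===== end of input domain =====

-- B replaces A's single accumulating scan by boundary-finding plus per-slice counting
-- (objective: alternative decomposition, no speed claim).

-- ===== PORT A =====
-- loop body of A: label bump (if/elif), then the [BOS] check; state = (dominant_count, reference_count, counts)
def pvStepA (tokens : List String) (labels : List String)
    (st : Int × Int × List (Int × Int)) (i : Int) : Int × Int × List (Int × Int) :=
  let lab := PySem.List.pyGetD labels i ""    -- labels[i]; in range under Pre_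
  let dr : Int × Int :=
    if lab = "B_Dominant" then (st.1 + 1, st.2.1)
    else if lab = "B_Reference" then (st.1, st.2.1 + 1)
    else (st.1, st.2.1)
  if PySem.List.pyGetD tokens i "" = "[BOS]" then  -- tokens[i]; in range under Pre_
    (0, 0, if i > 0 then st.2.2 ++ [(dr.1, dr.2)] else st.2.2)
  else
    (dr.1, dr.2, st.2.2)

def citation_by_sentence (tokens : List String) (citation_BIO_labels : List String) : List (Int × Int) :=
  let res := (PySem.List.pyRange 0 (tokens.length : Int)).foldl
    (pvStepA tokens citation_BIO_labels) (0, 0, [])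
  res.2.2 ++ [(res.1, res.2.1)]

-- ===== PORT B =====
-- cnt(seg) = (seg.count("B_Dominant"), seg.count("B_Reference"))
def pvCnt (seg : List String) : Int × Int :=
  ((PySem.List.count seg "B_Dominant" : Int), (PySem.List.count seg "B_Reference" : Int))

-- loop body of B: state = (counts, prev)
def pvStepB (labels : List String)
    (st : List (Int × Int) × Int) (b : Int) : List (Int × Int) × Int :=
  (if b > 0 then st.1 ++ [pvCnt (PySem.List.slice labels (some (st.2 + 1)) (some (b + 1)))] else st.1, b)

def citation_by_sentence_alt (tokens : List String) (citation_BIO_labels : List String) : List (Int × Int) :=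
  let bos : List Int := (PySem.List.enumerate tokens 0).filterMap
    (fun p => if p.2 = "[BOS]" then some p.1 else none)
  let res := bos.foldl (pvStepB citation_BIO_labels) ([], -1)
  res.1 ++ [pvCnt (PySem.List.slice citation_BIO_labels (some (res.2 + 1)) (some (tokens.length : Int)))]

-- ===== PRECONDITION & SPEC =====
-- A indexes citation_BIO_labels[i] for every i < len(tokens): it raises IndexError when the
-- label list is shorter than the token list; exactly those inputs are excluded.
def Pre_citation_by_sentence (tokens : List String) (citation_BIO_labels : List String) : Prop :=
  tokens.length ≤ citation_BIO_labels.length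
instance (tokens : List String) (citation_BIO_labels : List String) : Decidable (Pre_citation_by_sentence tokens citation_BIO_labels) := by unfold Pre_citation_by_sentence; infer_instance

def pvWitness_citation_by_sentence : List String × List String :=
  (["Smith", "[BOS]", "et"], ["B_Dominant", "O", "B_Reference"])

def Spec_citation_by_sentence (tokens : List String) (citation_BIO_labels : List String) (out : List (Int × Int)) : Prop := out = citation_by_sentence_alt tokens citation_BIO_labels
instance (tokens : List String) (citation_BIO_labels : List String) (out : List (Int × Int)) : Decidable (Spec_citation_by_sentence tokens citation_BIO_labels out) := by unfold Spec_citation_by_sentence; infer_instance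

-- ===== CLAIM (what is proved, stated in full; the proofs are below) =====
def Claim_equal_citation_by_sentence : Prop := ∀ (tokens : List String) (citation_BIO_labels : List String), Dom_citation_by_sentence tokens citation_BIO_labels → Pre_citation_by_sentence tokens citation_BIO_labels → Spec_citation_by_sentence tokens citation_BIO_labels (citation_by_sentence tokens citation_BIO_labels)

-- ===== LEMMAS AND PROOFS =====

-- common spec: split the (token, label) pairs into label segments, each [BOS] closing its segment
def pvSegSplit : List (String × String) → List String → List (List String)
  | [], cur => [cur]
  | (t, l) :: rest, cur =>
    if t = "[BOS]" then (cur ++ [l]) :: pvSegSplit rest []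
    else pvSegSplit rest (cur ++ [l])

theorem pvCnt_append_singleton (xs : List String) (l : String) :
    pvCnt (xs ++ [l]) =
      (if l = "B_Dominant" then (pvCnt xs).1 + 1 else (pvCnt xs).1,
       if l = "B_Reference" then (pvCnt xs).2 + 1 else (pvCnt xs).2) := by
  simp [pvCnt, PySem.List.count_eq, List.count_append, List.count_cons]
  constructor <;> split_ifs <;> simp_all

theorem pvSegSplit_cons (t l : String) (rest : List (String × String)) (cur : List String) :
    pvSegSplit ((t, l) :: rest) cur
      = if t = "[BOS]" then (cur ++ [l]) :: pvSegSplit rest [] else pvSegSplit rest (cur ++ [l]) := rfl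

theorem pv_A_go (tokens labels : List String) (hl : tokens.length ≤ labels.length) :
    ∀ (ts : List String) (s : Nat) (pend : List String) (acc : List (Int × Int)),
    ts = tokens.drop s → 0 < s →
    ((PySem.List.pyRange (s : Int) (tokens.length : Int)).foldl
        (pvStepA tokens labels) ((pvCnt pend).1, (pvCnt pend).2, acc)).2.2
      ++ [(((PySem.List.pyRange (s : Int) (tokens.length : Int)).foldl
        (pvStepA tokens labels) ((pvCnt pend).1, (pvCnt pend).2, acc)).1,
          ((PySem.List.pyRange (s : Int) (tokens.length : Int)).foldl
        (pvStepA tokens labels) ((pvCnt pend).1, (pvCnt pend).2, acc)).2.1)]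
      = acc ++ (pvSegSplit (ts.zip (labels.drop s)) pend).map pvCnt := by
  intro ts
  induction ts with
  | nil =>
    intro s pend acc hts _
    have hn : tokens.length ≤ s := List.drop_eq_nil_iff.mp hts.symm
    rw [PySem.List.pyRange_one_eq_nil (by exact_mod_cast hn)]
    simp [pvSegSplit]
  | cons t ts' ih =>
    intro s pend acc hts hs
    have hslen : s < tokens.length := by
      by_contra h
      simp [List.drop_eq_nil_iff.mpr (show tokens.length ≤ s by omega)] at hts
    have hslab : s < labels.length := by omega
    have htok : tokens[s] = t := by
      have : (tokens.drop s)[0]'(by rw [← hts]; simp) = t := by simp [← hts]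
      simpa using this
    have hts' : ts' = tokens.drop (s + 1) := by
      have := congrArg List.tail hts
      simpa [List.tail_drop] using this
    have hldrop : labels.drop s = labels[s] :: labels.drop (s + 1) :=
      (List.getElem_cons_drop hslab).symm
    rw [PySem.List.pyRange_one_cons (by exact_mod_cast hslen)]
    rw [List.foldl_cons]
    have hgetl : PySem.List.pyGetD labels (s : Int) "" = labels[s] := by
      rw [PySem.List.pyGetD_natCast]; exact List.getD_eq_getElem _ _ hslab
    have hgett : PySem.List.pyGetD tokens (s : Int) "" = t := by
      rw [PySem.List.pyGetD_natCast, List.getD_eq_getElem _ _ hslen, htok]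
    have hcast : ((s : Int) + 1) = ((s + 1 : Nat) : Int) := by push_cast; ring
    by_cases hbos : t = "[BOS]"
    · have hstep : pvStepA tokens labels ((pvCnt pend).1, (pvCnt pend).2, acc) (s : Int)
          = ((pvCnt []).1, (pvCnt []).2, acc ++ [pvCnt (pend ++ [labels[s]])]) := by
        simp only [pvStepA, hgetl, hgett, hbos]
        rw [pvCnt_append_singleton]
        simp only [pvCnt, PySem.List.count_eq]
        simp [hs]
        split_ifs <;> simp_all
      rw [hstep, hcast, ih (s + 1) [] (acc ++ [pvCnt (pend ++ [labels[s]])]) hts' (by omega)]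
      rw [hldrop, List.zip_cons_cons, pvSegSplit_cons]
      simp [hbos]
    · have hstep : pvStepA tokens labels ((pvCnt pend).1, (pvCnt pend).2, acc) (s : Int)
          = ((pvCnt (pend ++ [labels[s]])).1, (pvCnt (pend ++ [labels[s]])).2, acc) := by
        simp only [pvStepA, hgetl, hgett, if_neg hbos]
        rw [pvCnt_append_singleton]
        split_ifs <;> simp_all
      rw [hstep, hcast, ih (s + 1) (pend ++ [labels[s]]) acc hts' (by omega)]
      rw [hldrop, List.zip_cons_cons, pvSegSplit_cons]
      simp [hbos]

theorem pv_B_go (tokens labels : List String) (hl : tokens.length ≤ labels.length) :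
    ∀ (ts : List String) (s p : Nat) (acc : List (Int × Int)),
    ts = tokens.drop s → 0 < s → p ≤ s → s ≤ tokens.length →
    (((PySem.List.enumerate ts (s : Int)).filterMap
        (fun q => if q.2 = "[BOS]" then some q.1 else none)).foldl
          (pvStepB labels) (acc, (p : Int) - 1)).1
      ++ [pvCnt (PySem.List.slice labels
            (some ((((PySem.List.enumerate ts (s : Int)).filterMap
        (fun q => if q.2 = "[BOS]" then some q.1 else none)).foldl
          (pvStepB labels) (acc, (p : Int) - 1)).2 + 1))
            (some (tokens.length : Int)))]
      = acc ++ (pvSegSplit (ts.zip (labels.drop s)) ((labels.drop p).take (s - p))).map pvCnt := by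
  intro ts
  induction ts with
  | nil =>
    intro s p acc hts _ hp hsn
    have hn : s = tokens.length := by
      have := List.drop_eq_nil_iff.mp hts.symm; omega
    have : ((p : Int) - 1 + 1) = ((p : Nat) : Int) := by ring
    simp only [PySem.List.enumerate_nil, List.filterMap_nil, List.foldl_nil, this]
    rw [PySem.List.slice_natCast]
    simp [pvSegSplit, hn]
  | cons t ts' ih =>
    intro s p acc hts hs hp hsn
    have hslen : s < tokens.length := by
      by_contra h
      simp [List.drop_eq_nil_iff.mpr (show tokens.length ≤ s by omega)] at hts
    have hslab : s < labels.length := by omega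
    have hts' : ts' = tokens.drop (s + 1) := by
      have := congrArg List.tail hts
      simpa [List.tail_drop] using this
    have hldrop : labels.drop s = labels[s] :: labels.drop (s + 1) :=
      (List.getElem_cons_drop hslab).symm
    have hext : (labels.drop p).take (s - p) ++ [labels[s]]
        = (labels.drop p).take (s + 1 - p) := by
      have h1 : s + 1 - p = (s - p) + 1 := by omega
      have h2 : s - p < (labels.drop p).length := by simp; omega
      rw [h1, List.take_add_one]
      have : (labels.drop p)[s - p]? = some labels[s] := by
        rw [List.getElem?_eq_getElem h2]
        congr 1
        rw [List.getElem_drop]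
        congr 1
        omega
      rw [this]
      rfl
    rw [PySem.List.enumerate_cons]
    by_cases hbos : t = "[BOS]"
    · have hfm : (((s : Int), t) :: PySem.List.enumerate ts' ((s : Int) + 1)).filterMap
          (fun q => if q.2 = "[BOS]" then some q.1 else none)
          = (s : Int) :: (PySem.List.enumerate ts' ((s : Int) + 1)).filterMap
              (fun q => if q.2 = "[BOS]" then some q.1 else none) := by
        simp [hbos]
      rw [hfm, List.foldl_cons]
      have hstep : pvStepB labels (acc, (p : Int) - 1) (s : Int)
          = (acc ++ [pvCnt ((labels.drop p).take (s + 1 - p))], ((s + 1 : Nat) : Int) - 1) := by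
        simp only [pvStepB, if_pos (show (0:Int) < (s:Int) by exact_mod_cast hs), Prod.mk.injEq]
        refine ⟨?_, by push_cast; ring⟩
        congr 2
        have h1 : ((p : Int) - 1 + 1) = ((p : Nat) : Int) := by ring
        have h2 : ((s : Int) + 1) = ((s + 1 : Nat) : Int) := by push_cast; ring
        rw [h1, h2, PySem.List.slice_natCast, ← hext]
      rw [hstep]
      have hcast : ((s : Int) + 1) = ((s + 1 : Nat) : Int) := by push_cast; ring
      rw [hcast, ih (s + 1) (s + 1) (acc ++ [pvCnt ((labels.drop p).take (s + 1 - p))]) hts'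
        (by omega) (by omega) (by omega)]
      rw [hldrop, List.zip_cons_cons, pvSegSplit_cons]
      simp [hbos, hext]
    · have hfm : (((s : Int), t) :: PySem.List.enumerate ts' ((s : Int) + 1)).filterMap
          (fun q => if q.2 = "[BOS]" then some q.1 else none)
          = (PySem.List.enumerate ts' ((s : Int) + 1)).filterMap
              (fun q => if q.2 = "[BOS]" then some q.1 else none) := by
        simp [hbos]
      rw [hfm]
      have hcast : ((s : Int) + 1) = ((s + 1 : Nat) : Int) := by push_cast; ring
      rw [hcast, ih (s + 1) p acc hts' (by omega) (by omega) (by omega)]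
      rw [hldrop, List.zip_cons_cons, pvSegSplit_cons]
      simp [hbos, hext]

-- ===== VERDICT (by name: the statement is the Claim_ definition above) =====
theorem citation_by_sentence_spec : Claim_equal_citation_by_sentence := by
  intro tokens labels _ hpre
  unfold Spec_citation_by_sentence citation_by_sentence citation_by_sentence_alt
  dsimp only
  have hl : tokens.length ≤ labels.length := hpre
  match htok : tokens with
  | [] => simp [PySem.List.pyRange_one_eq_nil, pvCnt]
  | t :: rest =>
    have hlen0 : 0 < (t :: rest).length := by simp
    have hlab0 : 0 < labels.length := by
      have := hl; simp at this ⊢; omega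
    have hget0l : PySem.List.pyGetD labels (0 : Int) "" = labels[0] := by
      have : ((0 : Nat) : Int) = (0 : Int) := by norm_num
      rw [← this, PySem.List.pyGetD_natCast]; exact List.getD_eq_getElem _ _ hlab0
    have hldrop : labels = labels[0] :: labels.drop 1 := by
      simpa using (List.getElem_cons_drop hlab0).symm
    rw [PySem.List.pyRange_one_cons (by exact_mod_cast hlen0), List.foldl_cons,
      PySem.List.enumerate_cons]
    have e01 : (0 : Int) + 1 = ((1 : Nat) : Int) := by norm_num
    rw [e01]
    by_cases hbos : t = "[BOS]"
    · -- leading [BOS]: A resets without emitting; B skips the boundary b = 0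
      have hstepA : pvStepA (t :: rest) labels ((0:Int), (0:Int), ([] : List (Int × Int))) 0
          = ((pvCnt []).1, (pvCnt []).2, ([] : List (Int × Int))) := by
        simp [pvStepA, hbos, pvCnt]
      have hstepB : pvStepB labels (([] : List (Int × Int)), -1) 0
          = (([] : List (Int × Int)), ((1 : Nat) : Int) - 1) := by
        simp [pvStepB]
      have hfm : (((0 : Int), t) :: PySem.List.enumerate rest ((1 : Nat) : Int)).filterMap
          (fun q => if q.2 = "[BOS]" then some q.1 else none)
          = (0 : Int) :: (PySem.List.enumerate rest ((1 : Nat) : Int)).filterMap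
              (fun q => if q.2 = "[BOS]" then some q.1 else none) := by
        simp [hbos]
      rw [hfm, List.foldl_cons, hstepB, hstepA]
      rw [pv_A_go (t :: rest) labels hl rest 1 [] [] (by simp) (by omega)]
      rw [pv_B_go (t :: rest) labels hl rest 1 1 [] (by simp) (by omega) (by omega) (by simp)]
      simp
    · -- ordinary first token: its label opens the first segment
      have hstepA : pvStepA (t :: rest) labels ((0:Int), (0:Int), ([] : List (Int × Int))) 0
          = ((pvCnt [labels[0]]).1, (pvCnt [labels[0]]).2, ([] : List (Int × Int))) := by
        have h0 : PySem.List.pyGetD (t :: rest) (0 : Int) "" = t := by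
          simp [PySem.List.pyGetD_zero_cons]
        dsimp only [pvStepA]
        rw [h0, hget0l, if_neg hbos]
        clear hldrop
        split_ifs <;> simp_all [pvCnt, PySem.List.count_eq, List.count_nil]
      have hfm : (((0 : Int), t) :: PySem.List.enumerate rest ((1 : Nat) : Int)).filterMap
          (fun q => if q.2 = "[BOS]" then some q.1 else none)
          = (PySem.List.enumerate rest ((1 : Nat) : Int)).filterMap
              (fun q => if q.2 = "[BOS]" then some q.1 else none) := by
        simp [hbos]
      rw [hfm, hstepA]
      rw [pv_A_go (t :: rest) labels hl rest 1 [labels[0]] [] (by simp) (by omega)]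
      have hB := pv_B_go (t :: rest) labels hl rest 1 0 [] (by simp) (by omega) (by omega) (by simp)
      simp only [Nat.cast_zero, zero_sub] at hB
      rw [hB]
      have htake : (labels.drop 0).take (1 - 0) = [labels[0]] := by
        simp [List.take_add_one, List.getElem?_eq_getElem hlab0]
      rw [htake]
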